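-- pv_equiv track=rewrite | github.com/ckswls56/BaejoonHub | 프로그래머스/2/152996. 시소 짝꿍/시소 짝꿍.py | solution
-- ===== SOURCE A (Python) =====
-- from math import comb
--
-- def solution(weights):
--     m = {}
--
--     for w in weights:
--         m[w] = m.get(w,0) + 1
--
--     l = m.items()
--     answer =0
--     same = 0
--     for k,v in m.items():
--         same += comb(v,2)
--
--         for another_k,another_v in l :
--             if k != another_k:
--                 for i in (2,3,4):
--                     for j in (2,3,4):
--                         if k*i == another_k *j:
--                             answer += v*another_v
--
--
--     return answer//2 + same
-- ===== SOURCE B (Python) =====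
-- def solution(weights):
--     cnt = {}
--     for w in weights:
--         cnt[w] = cnt.get(w, 0) + 1
--     same = sum(v * (v - 1) // 2 for v in cnt.values())
--     ans = 0
--     for k, v in cnt.items():
--         for i, j in ((2, 3), (2, 4), (3, 2), (3, 4), (4, 2), (4, 3)):
--             if (k * i) % j == 0:
--                 p = (k * i) // j
--                 if p != k:
--                     ans += v * cnt.get(p, 0)
--     return ans // 2 + same
-- ===== Notes on version B (the rewrite author's own statement) =====
-- stated objective: faster
-- what changed: Replaces A's O(D^2) all-pairs ratio scan over the distinct weights (9 ratio tests per ordered pair) by six divisibility-guarded counter lookups per distinct weight (partner weight k*i//j), so the inner scan over the items disappears.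
import Mathlib
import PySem

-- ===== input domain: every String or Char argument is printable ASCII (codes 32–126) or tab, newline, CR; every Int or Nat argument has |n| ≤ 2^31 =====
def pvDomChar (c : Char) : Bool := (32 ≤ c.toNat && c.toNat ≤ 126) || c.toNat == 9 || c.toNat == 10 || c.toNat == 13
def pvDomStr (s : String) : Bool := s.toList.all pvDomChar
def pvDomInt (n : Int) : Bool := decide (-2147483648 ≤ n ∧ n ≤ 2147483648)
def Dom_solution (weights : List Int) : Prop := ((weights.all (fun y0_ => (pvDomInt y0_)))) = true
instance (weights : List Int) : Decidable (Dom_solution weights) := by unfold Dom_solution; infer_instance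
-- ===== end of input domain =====

-- B replaces A's quadratic pairwise ratio scan over distinct weights by six counter
-- lookups per distinct weight (partner = k*i//j when divisible); return value only.

-- ===== PORT A =====
-- math.comb(v, 2) = v*(v-1)//2 (exact: comb is only applied to nonnegative counts)
def comb2 (v : Int) : Int := PySem.Int.floordiv (v * (v - 1)) 2

-- body of A's inner 'for another_k,another_v in l' loop (k, v fixed by the outer loop)
def pvAInner (k v : Int) (a : Int) (kv' : Int × Int) : Int :=
  if k ≠ kv'.1 then
    ([2, 3, 4] : List Int).foldl (fun a i =>
      ([2, 3, 4] : List Int).foldl (fun a j =>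
        if k * i = kv'.1 * j then a + v * kv'.2 else a) a) a
  else a

def solution (weights : List Int) : Int :=
  let m := weights.foldl (fun d w => d.insert w (d.getD w 0 + 1)) PySem.Dict.empty
  let l := m.items
  let res := m.items.foldl (fun (acc : Int × Int) kv =>
    (l.foldl (pvAInner kv.1 kv.2) acc.1, acc.2 + comb2 kv.2)) ((0 : Int), (0 : Int))
  PySem.Int.floordiv res.1 2 + res.2

-- ===== PORT B =====
def pvPairs6 : List (Int × Int) := [(2, 3), (2, 4), (3, 2), (3, 4), (4, 2), (4, 3)]

-- body of B's 'for i, j in (...)' loop (k, v fixed by the outer loop)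
def pvBStep (cnt : PySem.Dict Int Int) (k v : Int) (a : Int) (ij : Int × Int) : Int :=
  if PySem.Int.mod (k * ij.1) ij.2 = 0 then
    let p := PySem.Int.floordiv (k * ij.1) ij.2
    if p ≠ k then a + v * cnt.getD p 0 else a
  else a

def solution_alt (weights : List Int) : Int :=
  let cnt := weights.foldl (fun d w => d.insert w (d.getD w 0 + 1)) PySem.Dict.empty
  let same := (cnt.values.map (fun v => PySem.Int.floordiv (v * (v - 1)) 2)).sum
  let ans := cnt.items.foldl (fun (a : Int) kv => pvPairs6.foldl (pvBStep cnt kv.1 kv.2) a) 0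
  PySem.Int.floordiv ans 2 + same

-- ===== PRECONDITION & SPEC =====
def Spec_solution (weights : List Int) (out : Int) : Prop := out = solution_alt weights
instance (weights : List Int) (out : Int) : Decidable (Spec_solution weights out) := by unfold Spec_solution; infer_instance

-- ===== CLAIM (what is proved, stated in full; the proofs are below) =====
def Claim_equal_solution : Prop := ∀ (weights : List Int), Dom_solution weights → Spec_solution weights (solution weights)

-- ===== LEMMAS AND PROOFS =====

-- contribution of one inner-loop item (k', v') in A, with the three diagonal (i, i)
-- ratio tests (which can never fire when k ≠ k') already dropped
def delta9 (k v k' v' : Int) : Int :=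
  (if k ≠ k' ∧ k * 2 = k' * 3 then v * v' else 0) +
  (if k ≠ k' ∧ k * 2 = k' * 4 then v * v' else 0) +
  (if k ≠ k' ∧ k * 3 = k' * 2 then v * v' else 0) +
  (if k ≠ k' ∧ k * 3 = k' * 4 then v * v' else 0) +
  (if k ≠ k' ∧ k * 4 = k' * 2 then v * v' else 0) +
  (if k ≠ k' ∧ k * 4 = k' * 3 then v * v' else 0)

-- contribution of one distinct weight k in B (the six lookups, summed)
def bterm (cnt : PySem.Dict Int Int) (k v i j : Int) : Int :=
  if PySem.Int.mod (k * i) j = 0 ∧ PySem.Int.floordiv (k * i) j ≠ k then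
    v * cnt.getD (PySem.Int.floordiv (k * i) j) 0
  else 0

def bsum (cnt : PySem.Dict Int Int) (k v : Int) : Int :=
  bterm cnt k v 2 3 + bterm cnt k v 2 4 + bterm cnt k v 3 2 +
  bterm cnt k v 3 4 + bterm cnt k v 4 2 + bterm cnt k v 4 3

lemma addIf (c : Prop) [Decidable c] (x t : Int) :
    (if c then x + t else x) = x + (if c then t else 0) := by split_ifs <;> ring

lemma pvAInner_eq (k v a : Int) (kv' : Int × Int) :
    pvAInner k v a kv' = a + delta9 k v kv'.1 kv'.2 := by
  obtain ⟨k', v'⟩ := kv'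
  unfold pvAInner delta9
  by_cases h : k = k'
  · simp [h]
  · have h22 : ¬(k * 2 = k' * 2) := by omega
    have h33 : ¬(k * 3 = k' * 3) := by omega
    have h44 : ¬(k * 4 = k' * 4) := by omega
    simp only [List.foldl, addIf, if_neg h22, if_neg h33, if_neg h44, ne_eq, h,
      not_false_eq_true, true_and, if_pos]
    ring

lemma pvBStep_eq (cnt : PySem.Dict Int Int) (k v a : Int) (ij : Int × Int) :
    pvBStep cnt k v a ij = a + bterm cnt k v ij.1 ij.2 := by
  unfold pvBStep bterm
  split_ifs <;> simp_all

lemma sum_ite_key (p : Int) (f : Int → Int) (D : List Int) (hD : D.Nodup) :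
    (D.map (fun x => if x = p then f x else 0)).sum = if p ∈ D then f p else 0 := by
  induction D with
  | nil => simp
  | cons x t ih =>
    have hx := (List.nodup_cons.mp hD)
    by_cases hxp : x = p
    · subst hxp
      simp [ih hx.2, hx.1]
    · simp [hxp, ih hx.2, Ne.symm hxp]

lemma Lsingle (W : List Int) (k v i j : Int) (hj : 0 < j) :
    ((PySem.Set.ofList W).map
        (fun k' => if k ≠ k' ∧ k * i = k' * j then v * (W.count k' : Int) else 0)).sum
      = bterm (PySem.Dict.counter W) k v i j := by
  unfold bterm
  rw [PySem.Dict.getD_counter]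
  set p := PySem.Int.floordiv (k * i) j with hp
  have hiff : ∀ k', (k ≠ k' ∧ k * i = k' * j) ↔
      (PySem.Int.mod (k * i) j = 0 ∧ p ≠ k ∧ k' = p) := by
    intro k'
    constructor
    · rintro ⟨hne, heq⟩
      have hd : j ∣ k * i := by rw [heq]; exact Dvd.intro_left k' rfl
      have hkp : p = k' := by
        rw [hp, heq, PySem.Int.floordiv_eq_ediv_of_pos hj, Int.mul_ediv_cancel _ (ne_of_gt hj)]
      refine ⟨(PySem.Int.mod_eq_zero_iff_dvd _ _).2 hd, ?_, hkp.symm⟩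
      rw [hkp]; exact fun e => hne e.symm
    · rintro ⟨hm, hpk, hk'⟩
      have hd := (PySem.Int.mod_eq_zero_iff_dvd _ _).1 hm
      have hmul : k' * j = k * i := by
        rw [hk', hp, PySem.Int.floordiv_eq_ediv_of_pos hj]; exact Int.ediv_mul_cancel hd
      exact ⟨fun e => hpk (by omega), hmul.symm⟩
  by_cases hc : PySem.Int.mod (k * i) j = 0 ∧ p ≠ k
  · have hfun : (fun k' => if k ≠ k' ∧ k * i = k' * j then v * (W.count k' : Int) else 0)
        = fun k' => if k' = p then v * (W.count k' : Int) else 0 := by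
      funext k'
      by_cases hkp : k' = p
      · rw [if_pos hkp, if_pos ((hiff k').2 ⟨hc.1, hc.2, hkp⟩)]
      · rw [if_neg hkp, if_neg (fun h => hkp ((hiff k').1 h).2.2)]
    rw [hfun, sum_ite_key p _ _ (PySem.Set.nodup_ofList W), if_pos hc]
    by_cases hmem : p ∈ PySem.Set.ofList W
    · rw [if_pos hmem]
    · rw [if_neg hmem]
      have : W.count p = 0 := List.count_eq_zero.2 (fun h => hmem ((PySem.Set.mem_ofList W p).2 h))
      rw [this]; simp
  · have hfun : (fun k' => if k ≠ k' ∧ k * i = k' * j then v * (W.count k' : Int) else 0)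
        = fun _ => (0 : Int) := by
      funext k'
      rw [if_neg (fun h => hc ⟨((hiff k').1 h).1, ((hiff k').1 h).2.1⟩)]
    rw [hfun, if_neg hc]
    simp

lemma key_sum (W : List Int) (k v : Int) :
    (((PySem.Dict.counter W).items).map (fun kv' => delta9 k v kv'.1 kv'.2)).sum
      = bsum (PySem.Dict.counter W) k v := by
  rw [PySem.Dict.items_counter, List.map_map]
  unfold bsum
  have expand : ((fun kv' : Int × Int => delta9 k v kv'.1 kv'.2) ∘
      fun k' => (k', (W.count k' : Int)))
      = fun k' => delta9 k v k' (W.count k' : Int) := rfl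
  rw [expand]
  unfold delta9
  rw [PySem.List.sum_map_add_int, PySem.List.sum_map_add_int, PySem.List.sum_map_add_int,
    PySem.List.sum_map_add_int, PySem.List.sum_map_add_int]
  rw [Lsingle W k v 2 3 (by norm_num), Lsingle W k v 2 4 (by norm_num),
    Lsingle W k v 3 2 (by norm_num), Lsingle W k v 3 4 (by norm_num),
    Lsingle W k v 4 2 (by norm_num), Lsingle W k v 4 3 (by norm_num)]

set_option maxHeartbeats 1000000 in
lemma inner_eq (W : List Int) (kv : Int × Int) (a : Int) :
    (PySem.Dict.counter W).items.foldl (pvAInner kv.1 kv.2) a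
      = pvPairs6.foldl (pvBStep (PySem.Dict.counter W) kv.1 kv.2) a := by
  rw [PySem.List.foldl_congr_mem _ _ (fun a kv' => a + delta9 kv.1 kv.2 kv'.1 kv'.2) a
      (fun acc x _ => pvAInner_eq kv.1 kv.2 acc x),
    PySem.List.foldl_add,
    PySem.List.foldl_congr_mem _ _ (fun a ij => a + bterm (PySem.Dict.counter W) kv.1 kv.2 ij.1 ij.2) a
      (fun acc x _ => pvBStep_eq (PySem.Dict.counter W) kv.1 kv.2 acc x),
    PySem.List.foldl_add, key_sum]
  show a + bsum _ _ _ = a + (pvPairs6.map _).sum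
  unfold pvPairs6
  simp [bsum]
  ring

lemma pair_split (items l : List (Int × Int)) (a s : Int) :
    (items.foldl (fun (acc : Int × Int) kv =>
        (l.foldl (pvAInner kv.1 kv.2) acc.1, acc.2 + comb2 kv.2)) (a, s))
      = (items.foldl (fun a kv => l.foldl (pvAInner kv.1 kv.2) a) a,
         s + (items.map (fun kv => comb2 kv.2)).sum) := by
  induction items generalizing a s with
  | nil => simp
  | cons x t ih => simp [ih, add_assoc]

-- ===== VERDICT (by name: the statement is the Claim_ definition above) =====
theorem solution_spec : Claim_equal_solution := by
  intro weights _
  show solution weights = solution_alt weights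
  unfold solution solution_alt
  rw [PySem.Dict.foldl_insert_getD_add_one_eq_counter]
  simp only [pair_split]
  congr 1
  · congr 1
    exact PySem.List.foldl_congr_mem _ _ _ 0 (fun acc kv _ => inner_eq weights kv acc)
  · show 0 + _ = _
    rw [zero_add]
    simp only [PySem.Dict.values, List.map_map]
    rfl
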